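-- pv_equiv track=rewrite | github.com/farzana039/Daily-Coding- | Cut the rope/cut the rope.py | count_ropes_after_cuts
-- ===== SOURCE A (Python) =====
-- def count_ropes_after_cuts(arr):
--     arr.sort() #Sort the array
--     result = []
--     prev_length = 0 #Perform cut operations
--     n = len(arr)
--     for i in range(n):
--         if arr[i] > prev_length:
--             result.append(n - i)  # Count ropes left after this cut
--             prev_length = arr[i]  # Update previous cut length
--     return result
-- ===== SOURCE B (Python) =====
-- def count_ropes_after_cuts(arr):
--     arr.sort()  # keep A's in-place sort side effect
--     n = len(arr)
--
--     def first_at_least(v):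
--         # binary search: index of the first element >= v in the sorted arr
--         lo, hi = 0, n
--         while lo < hi:
--             mid = (lo + hi) // 2
--             if arr[mid] < v:
--                 lo = mid + 1
--             else:
--                 hi = mid
--         return lo
--
--     # For each distinct positive cut length v (ascending), the ropes still standing
--     # when v is cut are exactly those of length >= v.
--     return [n - first_at_least(v) for v in sorted(set(arr)) if v > 0]
-- ===== Notes on version B (the rewrite author's own statement) =====
-- stated objective: alternative
-- what changed: A scans every index of the sorted array with a prev-length accumulator; B has no scan and no accumulator: it maps each distinct positive value v of sorted(set(arr)) to n minus the binary-searched index of the first element >= v.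
import Mathlib
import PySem

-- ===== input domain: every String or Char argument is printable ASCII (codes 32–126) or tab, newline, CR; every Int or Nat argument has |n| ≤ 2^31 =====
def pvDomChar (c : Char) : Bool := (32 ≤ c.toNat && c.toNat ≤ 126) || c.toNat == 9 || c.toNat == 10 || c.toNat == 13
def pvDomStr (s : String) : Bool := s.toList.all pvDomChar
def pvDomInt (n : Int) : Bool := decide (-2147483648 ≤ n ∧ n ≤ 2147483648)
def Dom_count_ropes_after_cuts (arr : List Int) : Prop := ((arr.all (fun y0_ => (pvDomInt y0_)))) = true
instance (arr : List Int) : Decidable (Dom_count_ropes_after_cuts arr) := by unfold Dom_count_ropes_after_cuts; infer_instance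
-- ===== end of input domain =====

-- B replaces A's indexed scan with a prev-length accumulator by a direct map: each distinct
-- positive value v of sorted(set(arr)) is sent to n minus the binary-searched index of the first
-- element >= v (a different algorithm; no speed claim is made). Both Pythons sort `arr` in place;
-- the theorems are about the return value only.

-- ===== PORT A =====
def count_ropes_after_cuts (arr : List Int) : List Int :=
  let s := PySem.List.sorted arr (fun x => x) false
  let n : Int := s.length
  (((PySem.List.pyRange 0 n 1).foldl
    (fun (st : List Int × Int) (i : Int) =>
      if PySem.List.pyGetD s i 0 > st.2 then (st.1 ++ [n - i], PySem.List.pyGetD s i 0) else st)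
    ([], 0))).1

-- ===== PORT B =====
-- the while-loop of Source B's first_at_least, as recursion on hi - lo
def firstAtLeast (s : List Int) (v : Int) (lo hi : Nat) : Nat :=
  if _h : lo < hi then
    if PySem.List.pyGetD s (((lo + hi) / 2 : Nat) : Int) 0 < v then
      firstAtLeast s v ((lo + hi) / 2 + 1) hi
    else
      firstAtLeast s v lo ((lo + hi) / 2)
  else lo
termination_by hi - lo
decreasing_by all_goals omega

def count_ropes_after_cuts_alt (arr : List Int) : List Int :=
  let s := PySem.List.sorted arr (fun x => x) false
  let n := s.length
  ((PySem.List.sorted (PySem.Set.ofList s) (fun x => x) false).filter (fun v => decide (v > 0))).map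
    (fun v => (n : Int) - (firstAtLeast s v 0 n : Int))

-- ===== PRECONDITION & SPEC =====
def Spec_count_ropes_after_cuts (arr : List Int) (out : List Int) : Prop := out = count_ropes_after_cuts_alt arr
instance (arr : List Int) (out : List Int) : Decidable (Spec_count_ropes_after_cuts arr out) := by unfold Spec_count_ropes_after_cuts; infer_instance

-- ===== CLAIM (what is proved, stated in full; the proofs are below) =====
def Claim_equal_count_ropes_after_cuts : Prop := ∀ (arr : List Int), Dom_count_ropes_after_cuts arr → Spec_count_ropes_after_cuts arr (count_ropes_after_cuts arr)

-- ===== LEMMAS AND PROOFS =====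

-- A's loop body (with the fixed rope count n), as a named function over enumerated pairs
def fA (n : Int) (st : List Int × Int) (p : Int × Int) : List Int × Int :=
  if p.2 > st.2 then (st.1 ++ [n - p.1], p.2) else st

-- A's loop over a run of equal values whose value does not beat prev leaves the state unchanged
lemma foldl_fA_const (n v : Int) : ∀ (r : List Int), (∀ x ∈ r, x = v) → ∀ (j p : Int) (acc : List Int),
    ¬ v > p → (PySem.List.enumerate r j).foldl (fA n) (acc, p) = (acc, p) := by
  intro r
  induction r with
  | nil => intro _ j p acc _; simp [PySem.List.enumerate_nil]
  | cons x t ih =>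
      intro h j p acc hv
      have hx : x = v := h x (by simp)
      rw [PySem.List.enumerate_cons]
      simp only [List.foldl_cons, fA, hx]
      rw [if_neg hv]
      exact ih (fun y hy => h y (by simp [hy])) _ _ _ hv

lemma discard_not_mem {v : Int} {s : List Int} (h : v ∉ s) : PySem.Set.discard s v = s := by
  simp only [PySem.Set.discard]
  apply List.filter_eq_self.mpr
  intro y hy
  have : y ≠ v := fun e => h (e ▸ hy)
  simp [this]

lemma discard_ofList_cons_self (v : Int) (l : List Int) :
    PySem.Set.discard (PySem.Set.ofList (v :: l)) v = PySem.Set.discard (PySem.Set.ofList l) v := by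
  rw [PySem.Set.ofList_cons]
  simp [PySem.Set.discard, List.filter_filter]

-- set() of a sorted group decomposition: the leading run collapses to its value
lemma ofList_group (v : Int) : ∀ (r : List Int) (t : List Int), (∀ x ∈ r, x = v) → v ∉ t →
    PySem.Set.ofList (v :: (r ++ t)) = v :: PySem.Set.ofList t := by
  intro r
  induction r with
  | nil =>
      intro t _ ht
      rw [List.nil_append, PySem.Set.ofList_cons,
        discard_not_mem (by simpa [PySem.Set.mem_ofList] using ht)]
  | cons x r' ih =>
      intro t h ht
      have hx : x = v := h x (by simp)
      subst hx
      have hih := ih t (fun y hy => h y (by simp [hy])) ht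
      rw [List.cons_append, PySem.Set.ofList_cons, discard_ofList_cons_self,
        ← PySem.Set.ofList_cons, hih]

lemma dropWhile_head_false (p : Int → Bool) : ∀ (l : List Int) (h0 : Int) (t' : List Int),
    l.dropWhile p = h0 :: t' → p h0 = false := by
  intro l
  induction l with
  | nil => intro h0 t' h; simp [List.dropWhile] at h
  | cons x l ih =>
      intro h0 t' h
      by_cases hp : p x = true
      · rw [List.dropWhile_cons_of_pos hp] at h; exact ih _ _ h
      · rw [List.dropWhile_cons_of_neg hp] at h
        cases h
        exact Bool.eq_false_iff.mpr hp

-- set() keeps a subsequence of its input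
lemma ofList_sublist : ∀ (l : List Int), (PySem.Set.ofList l).Sublist l := by
  intro l
  induction l with
  | nil => simp [PySem.Set.ofList_nil]
  | cons x t ih =>
      rw [PySem.Set.ofList_cons]
      have hsub : (PySem.Set.discard (PySem.Set.ofList t) x).Sublist (PySem.Set.ofList t) := by
        simp only [PySem.Set.discard]
        exact List.filter_sublist
      exact List.Sublist.cons₂ x (hsub.trans ih)

-- on a ≤-sorted list, set() is strictly increasing
lemma ofList_pairwise_lt {s : List Int} (hs : s.Pairwise (· ≤ ·)) :
    (PySem.Set.ofList s).Pairwise (· < ·) := by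
  have hle : (PySem.Set.ofList s).Pairwise (· ≤ ·) := hs.sublist (ofList_sublist s)
  have hne : (PySem.Set.ofList s).Pairwise (· ≠ ·) := PySem.Set.nodup_ofList s
  exact (hle.and hne).imp (fun h => lt_of_le_of_ne h.1 h.2)

-- the core equivalence: A's scan of a sorted list = B's map over its distinct values
lemma main_loop : ∀ (N : Nat) (s : List Int), s.length ≤ N → s.Pairwise (· ≤ ·) →
    ∀ (prev i n : Int) (acc : List Int),
    (∀ x ∈ s, (prev < x ↔ 0 < x)) →
    n = i + (s.length : Int) →
    ((PySem.List.enumerate s i).foldl (fA n) (acc, prev)).1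
      = acc ++ ((PySem.Set.ofList s).filter (fun v => decide (v > 0))).map
          (fun v => ((s.filter (fun x => decide (v ≤ x))).length : Int)) := by
  intro N
  induction N with
  | zero =>
      intro s hlen _ prev i n acc _ _
      have : s = [] := List.eq_nil_of_length_eq_zero (Nat.le_zero.mp hlen)
      subst this
      simp [PySem.List.enumerate_nil, PySem.Set.ofList]
  | succ N ih =>
      intro s hlen hsort prev i n acc hC hn
      cases s with
      | nil => simp [PySem.List.enumerate_nil, PySem.Set.ofList]
      | cons v rest =>
        have hsplit : rest.takeWhile (fun x => x == v) ++ rest.dropWhile (fun x => x == v) = rest :=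
          List.takeWhile_append_dropWhile
        generalize hr_def : rest.takeWhile (fun x => x == v) = r at hsplit
        generalize ht_def : rest.dropWhile (fun x => x == v) = t at hsplit
        have hr : ∀ x ∈ r, x = v := by
          intro x hx
          rw [← hr_def] at hx
          have h2 := List.mem_takeWhile_imp hx
          exact eq_of_beq h2
        have hvle : ∀ x ∈ rest, v ≤ x := (List.pairwise_cons.mp hsort).1
        have htsort : t.Pairwise (· ≤ ·) :=
          List.Pairwise.sublist (ht_def ▸ List.dropWhile_sublist _) (List.pairwise_cons.mp hsort).2
        have ht : ∀ x ∈ t, v < x := by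
          intro x hx
          cases htt : t with
          | nil => rw [htt] at hx; simp at hx
          | cons h0 t' =>
              have hh0 : h0 ≠ v := by
                have := dropWhile_head_false (fun x => x == v) rest h0 t' (by rw [ht_def, htt])
                simpa using this
              have hvh0 : v < h0 :=
                lt_of_le_of_ne (hvle h0 (by rw [← hsplit, htt]; simp)) (Ne.symm hh0)
              rw [htt] at hx
              rcases List.mem_cons.mp hx with rfl | hx'
              · exact hvh0
              · exact lt_of_lt_of_le hvh0 ((List.pairwise_cons.mp (htt ▸ htsort)).1 x hx')
        have hvnott : v ∉ t := fun hm => lt_irrefl v (ht v hm)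
        have hlent : t.length ≤ N := by
          have h1 : t.length ≤ rest.length := by
            rw [← ht_def]; exact (List.dropWhile_sublist _).length_le
          have h2 : rest.length ≤ N := by simpa using Nat.succ_le_succ_iff.mp hlen
          omega
        -- B's count at the minimum value v is the whole length
        have hallge : (v :: rest).filter (fun x => decide (v ≤ x)) = v :: rest := by
          apply List.filter_eq_self.mpr
          intro x hx
          rcases List.mem_cons.mp hx with rfl | hx'
          · simp
          · simpa using hvle x hx'
        -- for the later distinct values, counting over the whole suffix = counting over t
        have hck : ∀ k ∈ PySem.Set.ofList t,
            (v :: rest).filter (fun x => decide (k ≤ x)) = t.filter (fun x => decide (k ≤ x)) := by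
          intro k hk
          have hkt : k ∈ t := (PySem.Set.mem_ofList _ _).mp hk
          have hvk : v < k := ht k hkt
          have hrnil : r.filter (fun x => decide (k ≤ x)) = [] := by
            apply List.filter_eq_nil_iff.mpr
            intro x hx
            have : x = v := hr x hx
            simp [this]
            omega
          rw [← hsplit]
          rw [List.filter_cons, List.filter_append, hrnil]
          simp [not_le.mpr hvk]
        have hset : PySem.Set.ofList (v :: rest) = v :: PySem.Set.ofList t := by
          rw [← hsplit]; exact ofList_group v r t hr hvnott
        have hmapc : ((PySem.Set.ofList t).filter (fun w => decide (w > 0))).map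
              (fun w => (((v :: rest).filter (fun x => decide (w ≤ x))).length : Int))
            = ((PySem.Set.ofList t).filter (fun w => decide (w > 0))).map
              (fun w => ((t.filter (fun x => decide (w ≤ x))).length : Int)) := by
          apply List.map_congr_left
          intro k hk
          rw [hck k (List.mem_of_mem_filter hk)]
        have hlens : n - i = ((v :: rest).length : Int) := by omega
        have hrest : rest.length = r.length + t.length := by
          rw [← hsplit, List.length_append]
        have hn' : n = (i + 1 + (r.length : Int)) + (t.length : Int) := by
          simp only [List.length_cons, hrest] at hn
          push_cast at hn ⊢
          omega
        -- unfold one step on each side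
        rw [hset, List.filter_cons]
        conv_lhs => rw [← hsplit, PySem.List.enumerate_cons, List.foldl_cons,
          PySem.List.enumerate_append, List.foldl_append]
        have hguard : v > prev ↔ v > 0 := hC v (by simp)
        have hvt : ∀ x ∈ t, x ∈ v :: rest := by
          intro x hx; rw [← hsplit] at *; simp [hx]
        by_cases hg : v > prev
        · have hg0 : v > 0 := hguard.mp hg
          simp only [fA, if_pos hg]
          rw [foldl_fA_const n v r hr _ v _ (lt_irrefl v)]
          have hCt : ∀ x ∈ t, (v < x ↔ 0 < x) :=
            fun x hx => ⟨fun _ => lt_trans hg0 (ht x hx), fun _ => ht x hx⟩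
          rw [ih t hlent htsort v (i + 1 + r.length) n (acc ++ [n - i]) hCt (by push_cast [hn']; ring)]
          rw [if_pos (by simpa using hg0), List.map_cons, hmapc]
          rw [show ((v :: rest).filter (fun x => decide (v ≤ x))) = v :: rest from hallge]
          rw [← hlens]
          simp
        · have hg0 : ¬ v > 0 := fun h => hg (hguard.mpr h)
          simp only [fA, if_neg hg]
          rw [foldl_fA_const n v r hr _ prev _ hg]
          have hCt : ∀ x ∈ t, (prev < x ↔ 0 < x) := fun x hx => hC x (hvt x hx)
          rw [ih t hlent htsort prev (i + 1 + r.length) n acc hCt (by push_cast [hn']; ring)]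
          rw [if_neg (by simpa using hg0), hmapc]

-- on a sorted list, every element of dropWhile (< v) is >= v
lemma dropWhile_ge {s : List Int} (hsort : s.Pairwise (· ≤ ·)) (v : Int) :
    ∀ x ∈ s.dropWhile (fun x => decide (x < v)), v ≤ x := by
  intro x hx
  have hsub : (s.dropWhile (fun x => decide (x < v))).Sublist s := List.dropWhile_sublist _
  have hps : (s.dropWhile (fun x => decide (x < v))).Pairwise (· ≤ ·) := hsort.sublist hsub
  cases hd : s.dropWhile (fun x => decide (x < v)) with
  | nil => rw [hd] at hx; simp at hx
  | cons h0 t' =>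
      have hh0 : v ≤ h0 := by
        have := dropWhile_head_false (fun x => decide (x < v)) s h0 t' hd
        simpa using this
      rw [hd] at hx hps
      rcases List.mem_cons.mp hx with rfl | hx'
      · exact hh0
      · exact le_trans hh0 ((List.pairwise_cons.mp hps).1 x hx')

-- counting elements >= v on a sorted list = length minus the (< v)-prefix length
lemma count_ge_eq {s : List Int} (hsort : s.Pairwise (· ≤ ·)) (v : Int) :
    (s.filter (fun x => decide (v ≤ x))).length
      = s.length - (s.takeWhile (fun x => decide (x < v))).length := by
  conv_lhs => rw [← List.takeWhile_append_dropWhile (p := fun x => decide (x < v)) (l := s)]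
  rw [List.filter_append]
  have h1 : (s.takeWhile (fun x => decide (x < v))).filter (fun x => decide (v ≤ x)) = [] := by
    apply List.filter_eq_nil_iff.mpr
    intro x hx
    have := List.mem_takeWhile_imp hx
    simp at this ⊢
    omega
  have h2 : (s.dropWhile (fun x => decide (x < v))).filter (fun x => decide (v ≤ x))
      = s.dropWhile (fun x => decide (x < v)) := by
    apply List.filter_eq_self.mpr
    intro x hx
    simpa using dropWhile_ge hsort v x hx
  rw [h1, h2, List.nil_append]
  have := congrArg List.length (List.takeWhile_append_dropWhile (p := fun x => decide (x < v)) (l := s))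
  rw [List.length_append] at this
  omega

-- the index test the binary search makes, characterised by the prefix length
lemma getElem_lt_iff {s : List Int} (hsort : s.Pairwise (· ≤ ·)) (v : Int) (mid : Nat)
    (hm : mid < s.length) :
    (s[mid] < v ↔ mid < (s.takeWhile (fun x => decide (x < v))).length) := by
  have hsplit : s.takeWhile (fun x => decide (x < v)) ++ s.dropWhile (fun x => decide (x < v)) = s :=
    List.takeWhile_append_dropWhile
  have hlen := congrArg List.length hsplit
  rw [List.length_append] at hlen
  have hm' : mid < (s.takeWhile (fun x => decide (x < v)) ++ s.dropWhile (fun x => decide (x < v))).length := by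
    rw [List.length_append]; omega
  have heq : s[mid] = (s.takeWhile (fun x => decide (x < v)) ++ s.dropWhile (fun x => decide (x < v)))[mid]'hm' :=
    List.getElem_of_eq hsplit.symm hm
  constructor
  · intro hlt
    by_contra hge
    rw [not_lt] at hge
    -- mid lies in the dropWhile part, whose elements are all >= v
    have hmem : s[mid] ∈ s.dropWhile (fun x => decide (x < v)) := by
      rw [heq, List.getElem_append_right (by omega)]
      exact List.getElem_mem _
    exact absurd hlt (not_lt.mpr (dropWhile_ge hsort v _ hmem))
  · intro hlt
    rw [heq, List.getElem_append_left hlt]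
    have := List.mem_takeWhile_imp (List.getElem_mem hlt)
    simpa using this

-- the binary search returns the (< v)-prefix length
lemma firstAtLeast_eq {s : List Int} (hsort : s.Pairwise (· ≤ ·)) (v : Int) :
    ∀ (fuel lo hi : Nat), hi - lo ≤ fuel →
    lo ≤ (s.takeWhile (fun x => decide (x < v))).length →
    (s.takeWhile (fun x => decide (x < v))).length ≤ hi → hi ≤ s.length →
    firstAtLeast s v lo hi = (s.takeWhile (fun x => decide (x < v))).length := by
  intro fuel
  induction fuel with
  | zero =>
      intro lo hi hf hlo hhi _
      rw [firstAtLeast]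
      rw [dif_neg (by omega)]
      omega
  | succ N ih =>
      intro lo hi hf hlo hhi hn
      by_cases h : lo < hi
      · have hmlt : (lo + hi) / 2 < hi := by omega
        have hmge : lo ≤ (lo + hi) / 2 := by omega
        have hmn : (lo + hi) / 2 < s.length := by omega
        rw [firstAtLeast, dif_pos h]
        have hget : PySem.List.pyGetD s ((((lo + hi) / 2 : Nat)) : Int) 0 = s[(lo + hi) / 2] := by
          rw [PySem.List.pyGetD_natCast, List.getD_eq_getElem s 0 hmn]
        rw [hget]
        by_cases hc : s[(lo + hi) / 2] < v
        · rw [if_pos hc]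
          have := (getElem_lt_iff hsort v _ hmn).mp hc
          exact ih ((lo + hi) / 2 + 1) hi (by omega) (by omega) hhi hn
        · rw [if_neg hc]
          have := (getElem_lt_iff hsort v _ hmn).not.mp hc
          rw [not_lt] at this
          exact ih lo ((lo + hi) / 2) (by omega) hlo (by omega) (by omega)
      · rw [firstAtLeast, dif_neg h]
        omega

-- bridge: B's per-value binary-search expression = the count of elements >= v
lemma firstAtLeast_bridge {s : List Int} (hsort : s.Pairwise (· ≤ ·)) (v : Int) :
    ((s.length : Nat) : Int) - (firstAtLeast s v 0 s.length : Int)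
      = ((s.filter (fun x => decide (v ≤ x))).length : Int) := by
  have hc : (s.takeWhile (fun x => decide (x < v))).length ≤ s.length :=
    (List.takeWhile_sublist _).length_le
  rw [firstAtLeast_eq hsort v s.length 0 s.length (by omega) (by omega) hc (le_refl _)]
  rw [count_ge_eq hsort v]
  omega

-- ===== VERDICT (by name: the statement is the Claim_ definition above) =====
theorem count_ropes_after_cuts_spec : Claim_equal_count_ropes_after_cuts := by
  intro arr _
  unfold Spec_count_ropes_after_cuts count_ropes_after_cuts count_ropes_after_cuts_alt
  simp only []
  set s := PySem.List.sorted arr (fun x => x) false with hs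
  have hsort : s.Pairwise (· ≤ ·) := PySem.List.sorted_pairwise arr (fun x => x)
  -- B's sorted(set(s)) is just set(s), which is already strictly increasing
  have hBset : PySem.List.sorted (PySem.Set.ofList s) (fun x => x) false = PySem.Set.ofList s :=
    PySem.List.sorted_eq_self_of_pairwise _ _ ((ofList_pairwise_lt hsort).imp le_of_lt)
  rw [hBset]
  -- A's pyRange fold is the enumerate fold with body fA
  have hfold : ((PySem.List.pyRange 0 ((s.length : Nat) : Int) 1).foldl
      (fun (st : List Int × Int) (i : Int) =>
        if PySem.List.pyGetD s i 0 > st.2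
        then (st.1 ++ [((s.length : Nat) : Int) - i], PySem.List.pyGetD s i 0)
        else st) ([], 0))
      = (PySem.List.enumerate s 0).foldl (fA (s.length : Int)) ([], 0) := by
    rw [PySem.List.enumerate_eq_map_pyRange s 0, List.foldl_map]
    rfl
  rw [hfold]
  rw [main_loop s.length s (le_refl _) hsort 0 0 (s.length : Int) []
    (fun x _ => Iff.rfl) (by omega)]
  apply List.map_congr_left
  intro v _
  exact (firstAtLeast_bridge hsort v).symm
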